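-- pv_equiv track=rewrite | github.com/Shuttdown700/mediamanager | alexandria_utilities.py | remove_duplicate_tv_shows
-- ===== SOURCE A (Python) =====
-- def remove_duplicate_tv_shows(all_titles):
--     all_titles2 = []
--     for at in all_titles:
--         if at[-1] == ')':
--             all_titles2.append(at)
--         else:
--             all_titles2.append(' '.join(at.split()[:-1]))
--     return sorted(list(set(all_titles2)))
-- ===== SOURCE B (Python) =====
-- def remove_duplicate_tv_shows(all_titles):
--     def normalize(t):
--         if t.endswith(')'):
--             return t
--         return ' '.join(t.split()[:-1])
--     ordered = sorted(normalize(t) for t in all_titles)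
--     result = []
--     for s in ordered:
--         if not result or result[-1] != s:
--             result.append(s)
--     return result
-- ===== Notes on version B (the rewrite author's own statement) =====
-- stated objective: alternative
-- what changed: B dedupes by sorting the normalized titles first and then removing equal adjacent elements in one pass over the sorted list, instead of A's hash-set dedup followed by sorting; B also happens to be total on empty titles where A raises IndexError (excluded by Pre_).
import Mathlib
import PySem

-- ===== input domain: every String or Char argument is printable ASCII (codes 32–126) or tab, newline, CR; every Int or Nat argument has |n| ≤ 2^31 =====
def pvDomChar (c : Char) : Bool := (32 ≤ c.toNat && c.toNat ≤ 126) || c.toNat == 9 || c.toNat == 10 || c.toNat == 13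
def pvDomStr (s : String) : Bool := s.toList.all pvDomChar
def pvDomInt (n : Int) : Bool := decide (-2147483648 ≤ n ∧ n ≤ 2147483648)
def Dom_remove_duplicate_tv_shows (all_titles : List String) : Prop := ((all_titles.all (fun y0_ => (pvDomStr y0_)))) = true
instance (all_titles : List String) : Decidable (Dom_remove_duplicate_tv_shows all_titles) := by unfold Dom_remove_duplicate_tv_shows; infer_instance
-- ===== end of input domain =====

-- B replaces A's hash-set dedup by sort-then-adjacent-dedup (single pass after sorting); equivalence of the RETURN value is what is proved.

-- ===== PORT A =====
-- at[-1] == ')' test and else-branch normalisation of one title; '' stands for the IndexError case at[-1] on an empty title, excluded by Pre_.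
def pvNormA (t : String) : String :=
  match PySem.Str.pyGet? t (-1) with
  | some c =>
      if c = ')' then t
      else PySem.Str.join " " (PySem.List.slice (PySem.Str.split₀ t) none (some (-1)))
  | none => ""

def remove_duplicate_tv_shows (all_titles : List String) : List String :=
  let all_titles2 := all_titles.foldl (fun acc at_ => acc ++ [pvNormA at_]) []
  PySem.List.sorted (PySem.Set.ofList all_titles2) (fun x => x) false

-- ===== PORT B =====
def pvNormB (t : String) : String :=
  if PySem.Str.endswith t ")" then t
  else PySem.Str.join " " (PySem.List.slice (PySem.Str.split₀ t) none (some (-1)))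

def remove_duplicate_tv_shows_alt (all_titles : List String) : List String :=
  let ordered := PySem.List.sorted (all_titles.map pvNormB) (fun x => x) false
  ordered.foldl (fun result s =>
    if result = [] ∨ result.getLast? ≠ some s then result ++ [s] else result) []

-- ===== PRECONDITION & SPEC =====
-- Pre_ excludes lists containing an empty title, on which A's at[-1] raises IndexError.
def Pre_remove_duplicate_tv_shows (all_titles : List String) : Prop :=
  ∀ t ∈ all_titles, t ≠ ""
instance (all_titles : List String) : Decidable (Pre_remove_duplicate_tv_shows all_titles) := by unfold Pre_remove_duplicate_tv_shows; infer_instance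
def pvWitness_remove_duplicate_tv_shows : List String := ["Show (2020)", "Show (2020)", "Other 1080p"]

def Spec_remove_duplicate_tv_shows (all_titles : List String) (out : List String) : Prop := out = remove_duplicate_tv_shows_alt all_titles
instance (all_titles : List String) (out : List String) : Decidable (Spec_remove_duplicate_tv_shows all_titles out) := by unfold Spec_remove_duplicate_tv_shows; infer_instance

-- ===== CLAIM (what is proved, stated in full; the proofs are below) =====
def Claim_equal_remove_duplicate_tv_shows : Prop := ∀ (all_titles : List String), Dom_remove_duplicate_tv_shows all_titles → Pre_remove_duplicate_tv_shows all_titles → Spec_remove_duplicate_tv_shows all_titles (remove_duplicate_tv_shows all_titles)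

-- ===== LEMMAS AND PROOFS =====

-- the two normalisations agree on nonempty titles
lemma pvEndswith_concat (cs : List Char) (c : Char) :
    PySem.Chars.endswith (cs ++ [c]) [')'] = decide (c = ')') := by
  rw [Bool.eq_iff_iff]
  simp [PySem.Chars.endswith_iff, List.suffix_concat_iff]
  constructor
  · rintro ⟨t, ht, -⟩
    rcases List.eq_nil_or_concat t with rfl | ⟨u, a, rfl⟩
    · simpa using ht.symm
    · have := congrArg List.length ht; simp at this
  · rintro rfl; exact ⟨[], rfl, List.nil_suffix⟩

lemma pvNorm_eq (t : String) (ht : t ≠ "") : pvNormA t = pvNormB t := by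
  have hcs : t.toList ≠ [] := by
    intro h; apply ht; rw [← t.toList.length_eq_zero_iff] at h
    exact String.ext (by simp_all)
  rcases List.eq_nil_or_concat t.toList with h | ⟨cs, c, h⟩
  · exact absurd h hcs
  unfold pvNormA pvNormB
  have h1 : PySem.Str.pyGet? t (-1) = some c := by
    rw [PySem.Str.pyGet?_eq]; simp [h, PySem.List.pyGet?, PySem.List.pyIdx?]
  have h2 : PySem.Str.endswith t ")" = decide (c = ')') := by
    rw [PySem.Str.endswith_eq, show (")" : String).toList = [')'] from rfl, h,
      List.concat_eq_append, pvEndswith_concat]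
  rw [h1, h2]
  by_cases hc : c = ')' <;> simp [hc]

-- structural form of B's adjacent-dedup loop
def pvDedupRec : Option String → List String → List String
  | _, [] => []
  | prev, s :: rest =>
      if some s = prev then pvDedupRec prev rest else s :: pvDedupRec (some s) rest

lemma pvFoldl_dedup (l : List String) : ∀ acc : List String,
    l.foldl (fun result s =>
      if result = [] ∨ result.getLast? ≠ some s then result ++ [s] else result) acc
      = acc ++ pvDedupRec acc.getLast? l := by
  induction l with
  | nil => intro acc; simp [pvDedupRec]
  | cons s rest ih =>
    intro acc
    simp only [List.foldl_cons, pvDedupRec]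
    by_cases h : some s = acc.getLast?
    · have hne : acc ≠ [] := by intro h0; subst h0; simp at h
      rw [if_neg (by simp [hne, h.symm]), if_pos h, ih acc]
    · rw [if_pos (by right; exact fun hh => h hh.symm), if_neg h, ih (acc ++ [s])]
      simp

lemma pvDedupRec_subset (prev : Option String) (l : List String) :
    ∀ x ∈ pvDedupRec prev l, x ∈ l := by
  induction l generalizing prev with
  | nil => simp [pvDedupRec]
  | cons s rest ih =>
    intro x hx
    simp only [pvDedupRec] at hx
    split at hx
    · exact List.mem_cons_of_mem _ (ih _ x hx)
    · rcases List.mem_cons.1 hx with rfl | hx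
      · simp
      · exact List.mem_cons_of_mem _ (ih _ x hx)

lemma pvDedupRec_mem (prev : Option String) (l : List String) :
    ∀ x ∈ l, x ∈ pvDedupRec prev l ∨ some x = prev := by
  induction l generalizing prev with
  | nil => simp
  | cons s rest ih =>
    intro x hx
    simp only [pvDedupRec]
    by_cases h : some s = prev
    · rw [if_pos h]
      rcases List.mem_cons.1 hx with rfl | hx
      · right; exact h
      · exact ih prev x hx
    · rw [if_neg h]
      rcases List.mem_cons.1 hx with rfl | hx
      · left; simp
      · rcases ih (some s) x hx with h1 | h1
        · left; exact List.mem_cons_of_mem _ h1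
        · left; simp [Option.some_inj.1 h1]

def pvPrevLe : Option String → String → Prop
  | none, _ => True
  | some p, x => p ≤ x

lemma pvDedupRec_lt (l : List String) : ∀ prev : Option String,
    l.Pairwise (· ≤ ·) → (∀ x ∈ l, pvPrevLe prev x) →
    (pvDedupRec prev l).Pairwise (· < ·) ∧
      (∀ p, prev = some p → ∀ x ∈ pvDedupRec prev l, p < x) := by
  induction l with
  | nil => intro prev _ _; simp [pvDedupRec]
  | cons s rest ih =>
    intro prev hs hp
    rcases List.pairwise_cons.1 hs with ⟨hsr, hrest⟩
    simp only [pvDedupRec]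
    by_cases h : some s = prev
    · rw [if_pos h]
      exact ih prev hrest (fun x hx => hp x (List.mem_cons_of_mem _ hx))
    · rw [if_neg h]
      have hple : ∀ x ∈ rest, pvPrevLe (some s) x := fun x hx => hsr x hx
      obtain ⟨h1, h2⟩ := ih (some s) hrest hple
      have hslt : ∀ x ∈ pvDedupRec (some s) rest, s < x := h2 s rfl
      refine ⟨List.pairwise_cons.2 ⟨hslt, h1⟩, ?_⟩
      rintro p rfl x hx
      have hps : p < s := lt_of_le_of_ne (hp s (by simp)) (fun he => h (by rw [he]))
      rcases List.mem_cons.1 hx with rfl | hx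
      · exact hps
      · exact hps.trans (hslt x hx)

-- sorted(set(ns)) equals the adjacent-dedup of sorted(ns)
lemma pvSortedSet_eq_dedupSorted (ns : List String) :
    PySem.List.sorted (PySem.Set.ofList ns) (fun x => x) false
      = pvDedupRec none (PySem.List.sorted ns (fun x => x) false) := by
  set T := PySem.List.sorted ns (fun x => x) false with hT
  have hTp : T.Pairwise (· ≤ ·) := by
    have := PySem.List.sorted_pairwise ns (fun x => x) (κ := String)
    simpa [hT] using this
  obtain ⟨hlt, -⟩ := pvDedupRec_lt T none hTp (fun x _ => trivial)
  have hnd : (pvDedupRec none T).Nodup := hlt.imp (fun h => ne_of_lt h)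
  have hmem : ∀ x, x ∈ pvDedupRec none T ↔ x ∈ PySem.Set.ofList ns := by
    intro x
    rw [PySem.Set.mem_ofList]
    constructor
    · intro h
      have := pvDedupRec_subset none T x h
      rwa [hT, PySem.List.mem_sorted] at this
    · intro h
      have hxT : x ∈ T := by rw [hT, PySem.List.mem_sorted]; exact h
      rcases pvDedupRec_mem none T x hxT with h1 | h1
      · exact h1
      · simp at h1
  have hperm : (pvDedupRec none T).Perm (PySem.Set.ofList ns) :=
    (List.perm_ext_iff_of_nodup hnd (PySem.Set.nodup_ofList ns)).2 hmem
  exact PySem.List.sorted_eq_of_perm_of_pairwise_lt _ _ _ hperm hlt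

-- ===== VERDICT (by name: the statement is the Claim_ definition above) =====
theorem remove_duplicate_tv_shows_spec : Claim_equal_remove_duplicate_tv_shows := by
  intro l _ hpre
  unfold Spec_remove_duplicate_tv_shows remove_duplicate_tv_shows remove_duplicate_tv_shows_alt
  have hmap : l.foldl (fun acc at_ => acc ++ [pvNormA at_]) [] = l.map pvNormB := by
    rw [PySem.List.foldl_append_singleton_eq_map]
    simp only [List.nil_append]
    exact List.map_congr_left (fun t ht => pvNorm_eq t (hpre t ht))
  simp only [hmap, pvFoldl_dedup, List.nil_append, List.getLast?_nil]
  exact pvSortedSet_eq_dedupSorted (l.map pvNormB)
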